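-- pv_equiv track=rewrite | github.com/pypi-data/pypi-code-111 | polly-python/polly-python-0.0.8.tar.gz/polly/omixatlas.py | flatten_nested_schema_dict
-- ===== SOURCE A (Python) =====
-- def flatten_nested_schema_dict(nested_schema_dict: dict) -> dict:
--     """
--      Flatten the nested dict
--       Input:
--       schema:{
--                 "<SOURCE>": {
--                     "<DATATYPE>": {
--                         "<FIELD_NAME>": {
--                         "type": "text | integer | object",
--                         "description": "string", (Min=1, Max=100)
--                         },
--                         ... other fields
--                     }
--                     ... other Data types
--                 }
--                 ... other Sources
--             }
--
--       Output:
--                {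
--                    'Source':source_list,
--                    'Datatype': datatype_list,
--                    'Field Name':field_name_list,
--                    'Field Description':field_desc_list,
--                    'Field Type': field_type_list
--                }
--
--     """
--     reformed_dict = {}
--     source_list = []
--     data_type_list = []
--     field_name_list = []
--     field_description_list = []
--     field_type_list = []
--     for outer_key, inner_dict_datatype in nested_schema_dict.items():
--         for middle_key, inner_dict_fields in inner_dict_datatype.items():
--             for inner_key, field_values in inner_dict_fields.items():
--                 source_list.append(outer_key)
--                 data_type_list.append(middle_key)
--                 field_name_list.append(inner_key)
--                 for key, value in field_values.items():
--                     if key == 'description':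
--                         field_description_list.append(field_values[key])
--                     if key == 'type':
--                         field_type_list.append(field_values[key])
--
--     reformed_dict['Source'] = source_list
--     reformed_dict['Datatype'] = data_type_list
--     reformed_dict['Field Name'] = field_name_list
--     reformed_dict['Field Description'] = field_description_list
--     reformed_dict['Field Type'] = field_type_list
--     return reformed_dict
-- ===== SOURCE B (Python) =====
-- def flatten_nested_schema_dict(nested_schema_dict: dict) -> dict:
--     return {
--         'Source': [source
--                    for source, datatypes in nested_schema_dict.items()
--                    for datatype, fields in datatypes.items()
--                    for field in fields],
--         'Datatype': [datatype
--                      for source, datatypes in nested_schema_dict.items()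
--                      for datatype, fields in datatypes.items()
--                      for field in fields],
--         'Field Name': [field
--                        for source, datatypes in nested_schema_dict.items()
--                        for datatype, fields in datatypes.items()
--                        for field in fields],
--         'Field Description': [field_values['description']
--                               for source, datatypes in nested_schema_dict.items()
--                               for datatype, fields in datatypes.items()
--                               for field, field_values in fields.items()
--                               if 'description' in field_values],
--         'Field Type': [field_values['type']
--                        for source, datatypes in nested_schema_dict.items()
--                        for datatype, fields in datatypes.items()
--                        for field, field_values in fields.items()
--                        if 'type' in field_values],
--     }
-- ===== Notes on version B (the rewrite author's own statement) =====
-- stated objective: simpler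
-- what changed: A's single fused triple-nested loop that appends to five accumulator lists at once is replaced by five independent comprehensions, one per output column, each traversing the nested dict on its own (with an 'in field_values' membership filter for the two optional attribute columns).
import Mathlib
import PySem

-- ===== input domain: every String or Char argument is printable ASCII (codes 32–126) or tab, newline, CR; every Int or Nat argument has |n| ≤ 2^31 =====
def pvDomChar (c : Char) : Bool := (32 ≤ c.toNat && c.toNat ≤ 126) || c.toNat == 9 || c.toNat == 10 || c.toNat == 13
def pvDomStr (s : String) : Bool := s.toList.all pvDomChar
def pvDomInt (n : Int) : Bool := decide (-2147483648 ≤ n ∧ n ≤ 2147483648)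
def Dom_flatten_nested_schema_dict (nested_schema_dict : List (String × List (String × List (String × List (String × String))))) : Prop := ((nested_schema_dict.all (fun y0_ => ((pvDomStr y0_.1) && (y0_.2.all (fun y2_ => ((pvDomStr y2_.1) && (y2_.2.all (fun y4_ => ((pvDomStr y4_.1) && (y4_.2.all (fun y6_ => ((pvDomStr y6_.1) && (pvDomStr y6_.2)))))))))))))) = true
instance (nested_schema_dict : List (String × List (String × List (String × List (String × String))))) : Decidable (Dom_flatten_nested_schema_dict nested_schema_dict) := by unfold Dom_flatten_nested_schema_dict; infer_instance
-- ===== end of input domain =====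

-- B replaces A's single fused triple-nested loop (five accumulators updated in one pass) by five
-- independent comprehensions, one per output column; objective: simpler. Same O(n) cost.

-- ===== PORT A =====
-- state of A's loop: the five accumulator lists
-- (source_list, data_type_list, field_name_list, field_description_list, field_type_list)

-- innermost 'for key, value in field_values.items(): if key == 'description': …; if key == 'type': …'
-- (fv = field_values, used for the lookups field_values[key]; l = the same list being iterated;
--  field_values[key] with key coming from items() always hits, so the .getD "" default is never used)
def pvA_fieldLoop (fv : List (String × String)) (l : List (String × String))
    (st : List String × List String) : List String × List String :=
  l.foldl (fun st kv =>
    let st := if kv.1 = "description" then (st.1 ++ [(List.lookup kv.1 fv).getD ""], st.2) else st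
    if kv.1 = "type" then (st.1, st.2 ++ [(List.lookup kv.1 fv).getD ""]) else st) st

-- 'for inner_key, field_values in inner_dict_fields.items(): …'
def pvA_innerLoop (src dt : String) (flds : List (String × List (String × String)))
    (st : List String × List String × List String × List String × List String) :
    List String × List String × List String × List String × List String :=
  flds.foldl (fun st f =>
    let st := (st.1 ++ [src], st.2.1 ++ [dt], st.2.2.1 ++ [f.1], st.2.2.2.1, st.2.2.2.2)
    let dts := pvA_fieldLoop f.2 f.2 (st.2.2.2.1, st.2.2.2.2)
    (st.1, st.2.1, st.2.2.1, dts.1, dts.2)) st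

-- 'for middle_key, inner_dict_fields in inner_dict_datatype.items(): …'
def pvA_midLoop (src : String) (dts : List (String × List (String × List (String × String))))
    (st : List String × List String × List String × List String × List String) :
    List String × List String × List String × List String × List String :=
  dts.foldl (fun st m => pvA_innerLoop src m.1 m.2 st) st

def flatten_nested_schema_dict (nested_schema_dict : List (String × List (String × List (String × List (String × String))))) : List (String × List String) :=
  -- the five lists start empty, then the outer loop
  let st := nested_schema_dict.foldl (fun st o => pvA_midLoop o.1 o.2 st)
    (([] : List String), ([] : List String), ([] : List String), ([] : List String), ([] : List String))
  -- reformed_dict = {} then five assignments with fresh literal keys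
  ((((((PySem.Dict.empty).insert "Source" st.1).insert "Datatype" st.2.1).insert
      "Field Name" st.2.2.1).insert "Field Description" st.2.2.2.1).insert
      "Field Type" st.2.2.2.2).items

-- ===== PORT B =====
-- one comprehension per column
def pvB_sources (d : List (String × List (String × List (String × List (String × String))))) : List String :=
  d.flatMap (fun o => o.2.flatMap (fun m => m.2.map (fun _ => o.1)))
def pvB_datatypes (d : List (String × List (String × List (String × List (String × String))))) : List String :=
  d.flatMap (fun o => o.2.flatMap (fun m => m.2.map (fun _ => m.1)))
def pvB_fieldNames (d : List (String × List (String × List (String × List (String × String))))) : List String :=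
  d.flatMap (fun o => o.2.flatMap (fun m => m.2.map (fun f => f.1)))
-- '[field_values[k] for … for … for field, field_values in fields.items() if k in field_values]'
def pvB_attr (k : String) (d : List (String × List (String × List (String × List (String × String))))) : List String :=
  d.flatMap (fun o => o.2.flatMap (fun m =>
    (m.2.filter (fun f => (List.lookup k f.2).isSome)).map (fun f => (List.lookup k f.2).getD "")))

def flatten_nested_schema_dict_alt (nested_schema_dict : List (String × List (String × List (String × List (String × String))))) : List (String × List String) :=
  [("Source", pvB_sources nested_schema_dict),
   ("Datatype", pvB_datatypes nested_schema_dict),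
   ("Field Name", pvB_fieldNames nested_schema_dict),
   ("Field Description", pvB_attr "description" nested_schema_dict),
   ("Field Type", pvB_attr "type" nested_schema_dict)]

-- ===== PRECONDITION & SPEC =====
-- Pre_ excludes association lists in which some innermost field-attribute list repeats the key
-- "description" or "type": such a list does not represent any Python dict (dict keys are unique),
-- and on it A's port appends once per key occurrence while B's appends once per field.
def Pre_flatten_nested_schema_dict (nested_schema_dict : List (String × List (String × List (String × List (String × String))))) : Prop :=
  ∀ o ∈ nested_schema_dict, ∀ m ∈ o.2, ∀ f ∈ m.2,
    (f.2.map Prod.fst).count "description" ≤ 1 ∧ (f.2.map Prod.fst).count "type" ≤ 1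
instance (nested_schema_dict : List (String × List (String × List (String × List (String × String))))) : Decidable (Pre_flatten_nested_schema_dict nested_schema_dict) := by unfold Pre_flatten_nested_schema_dict; infer_instance

def pvWitness_flatten_nested_schema_dict : (List (String × List (String × List (String × List (String × String))))) :=
  [("geo", [("mutation", [("gene", [("type", "text"), ("description", "gene name")]),
                          ("chr", [("type", "text")])])])]

def Spec_flatten_nested_schema_dict (nested_schema_dict : List (String × List (String × List (String × List (String × String))))) (out : List (String × List String)) : Prop := out = flatten_nested_schema_dict_alt nested_schema_dict
instance (nested_schema_dict : List (String × List (String × List (String × List (String × String))))) (out : List (String × List String)) : Decidable (Spec_flatten_nested_schema_dict nested_schema_dict out) := by unfold Spec_flatten_nested_schema_dict; infer_instance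

-- ===== CLAIM (what is proved, stated in full; the proofs are below) =====
def Claim_equal_flatten_nested_schema_dict : Prop := ∀ (nested_schema_dict : List (String × List (String × List (String × List (String × String))))), Dom_flatten_nested_schema_dict nested_schema_dict → Pre_flatten_nested_schema_dict nested_schema_dict → Spec_flatten_nested_schema_dict nested_schema_dict (flatten_nested_schema_dict nested_schema_dict)

-- ===== LEMMAS AND PROOFS =====

-- B's per-field contribution to an attribute column
def pvAttrOne (k : String) (fv : List (String × String)) : List String :=
  if (List.lookup k fv).isSome then [(List.lookup k fv).getD ""] else []

-- '[g x for x in l if p x]' as a flatMap (shape of B's two filtered comprehensions)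
lemma pvFilterMap_eq_flatMap {α β : Type} (p : α → Bool) (g : α → β) (l : List α) :
    (l.filter p).map g = l.flatMap (fun x => if p x then [g x] else []) := by
  induction l with
  | nil => rfl
  | cons x xs ih =>
    simp only [List.filter_cons, List.flatMap_cons]
    by_cases h : p x = true <;> simp [h, ih]

lemma pvB_attr_eq_flatMap (k : String) (d : List (String × List (String × List (String × List (String × String))))) :
    pvB_attr k d = d.flatMap (fun o => o.2.flatMap (fun m => m.2.flatMap (fun f => pvAttrOne k f.2))) := by
  unfold pvB_attr pvAttrOne
  refine List.flatMap_congr (fun o _ => List.flatMap_congr (fun m _ => ?_))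
  rw [pvFilterMap_eq_flatMap]

lemma pvA_fieldLoop_gen (fv l : List (String × String)) (ds ts : List String) :
    pvA_fieldLoop fv l (ds, ts) =
      (ds ++ (l.filter (fun kv => kv.1 = "description")).map (fun _ => (List.lookup "description" fv).getD ""),
       ts ++ (l.filter (fun kv => kv.1 = "type")).map (fun _ => (List.lookup "type" fv).getD "")) := by
  induction l generalizing ds ts with
  | nil => simp [pvA_fieldLoop]
  | cons kv l ih =>
    simp only [pvA_fieldLoop, List.foldl_cons] at *
    by_cases h1 : kv.1 = "description"
    · have h2 : ¬ kv.1 = "type" := by rw [h1]; decide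
      simp [h1, ih, List.append_assoc]
    · by_cases h2 : kv.1 = "type"
      · simp [h2, ih, List.append_assoc]
      · simp [h1, h2, ih]

lemma pvFilter_count (k : String) (fv : List (String × String)) (h : (fv.map Prod.fst).count k ≤ 1) :
    (fv.filter (fun kv => kv.1 = k)).map (fun _ => (List.lookup k fv).getD "") = pvAttrOne k fv := by
  induction fv with
  | nil => rfl
  | cons x xs ih =>
    by_cases hx : x.1 = k
    · have hc : (xs.map Prod.fst).count k = 0 := by
        simp only [List.map_cons, List.count_cons, hx] at h
        simp at h
        omega
      have hnil : xs.filter (fun kv => kv.1 = k) = [] := by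
        rw [List.filter_eq_nil_iff]
        intro kv hkv
        have : k ∉ xs.map Prod.fst := List.count_eq_zero.mp hc
        simp only [decide_eq_true_eq]
        intro he
        exact this (he ▸ List.mem_map_of_mem hkv)
      have hbeq : (k == x.1) = true := by simp [hx]
      simp [hx, hnil, List.lookup, pvAttrOne]
    · have hbeq : (k == x.1) = false := by simp [Ne.symm hx]
      have h' : (xs.map Prod.fst).count k ≤ 1 := by
        simp only [List.map_cons, List.count_cons] at h
        omega
      simp only [List.filter_cons, List.lookup, hbeq, pvAttrOne] at *
      simp [hx, ih h']

lemma pvA_fieldLoop_eq (fv : List (String × String))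
    (hd : (fv.map Prod.fst).count "description" ≤ 1) (ht : (fv.map Prod.fst).count "type" ≤ 1)
    (ds ts : List String) :
    pvA_fieldLoop fv fv (ds, ts) = (ds ++ pvAttrOne "description" fv, ts ++ pvAttrOne "type" fv) := by
  rw [pvA_fieldLoop_gen, pvFilter_count _ _ hd, pvFilter_count _ _ ht]

lemma pvA_innerLoop_eq (src dt : String) (flds : List (String × List (String × String)))
    (h : ∀ f ∈ flds, (f.2.map Prod.fst).count "description" ≤ 1 ∧ (f.2.map Prod.fst).count "type" ≤ 1)
    (a b c e t : List String) :
    pvA_innerLoop src dt flds (a, b, c, e, t) =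
      (a ++ flds.map (fun _ => src), b ++ flds.map (fun _ => dt), c ++ flds.map (fun f => f.1),
       e ++ flds.flatMap (fun f => pvAttrOne "description" f.2),
       t ++ flds.flatMap (fun f => pvAttrOne "type" f.2)) := by
  induction flds generalizing a b c e t with
  | nil => simp [pvA_innerLoop]
  | cons f fs ih =>
    simp only [pvA_innerLoop, List.foldl_cons] at *
    obtain ⟨hd, ht⟩ := h f (List.mem_cons_self ..)
    rw [show (pvA_fieldLoop f.2 f.2 (e, t)) = (e ++ pvAttrOne "description" f.2, t ++ pvAttrOne "type" f.2) from pvA_fieldLoop_eq f.2 hd ht e t]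
    rw [ih (fun g hg => h g (List.mem_cons_of_mem _ hg))]
    simp [List.append_assoc]

lemma pvA_midLoop_eq (src : String) (dts : List (String × List (String × List (String × String))))
    (h : ∀ m ∈ dts, ∀ f ∈ m.2, (f.2.map Prod.fst).count "description" ≤ 1 ∧ (f.2.map Prod.fst).count "type" ≤ 1)
    (a b c e t : List String) :
    pvA_midLoop src dts (a, b, c, e, t) =
      (a ++ dts.flatMap (fun m => m.2.map (fun _ => src)),
       b ++ dts.flatMap (fun m => m.2.map (fun _ => m.1)),
       c ++ dts.flatMap (fun m => m.2.map (fun f => f.1)),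
       e ++ dts.flatMap (fun m => m.2.flatMap (fun f => pvAttrOne "description" f.2)),
       t ++ dts.flatMap (fun m => m.2.flatMap (fun f => pvAttrOne "type" f.2))) := by
  induction dts generalizing a b c e t with
  | nil => simp [pvA_midLoop]
  | cons m ms ih =>
    simp only [pvA_midLoop, List.foldl_cons] at *
    rw [pvA_innerLoop_eq _ _ _ (h m (List.mem_cons_self ..))]
    rw [ih (fun m' hm' => h m' (List.mem_cons_of_mem _ hm'))]
    simp [List.append_assoc]

lemma pvA_outer_eq (d : List (String × List (String × List (String × List (String × String)))))
    (h : Pre_flatten_nested_schema_dict d) (a b c e t : List String) :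
    d.foldl (fun st o => pvA_midLoop o.1 o.2 st) (a, b, c, e, t) =
      (a ++ pvB_sources d, b ++ pvB_datatypes d, c ++ pvB_fieldNames d,
       e ++ pvB_attr "description" d, t ++ pvB_attr "type" d) := by
  rw [pvB_attr_eq_flatMap, pvB_attr_eq_flatMap]
  induction d generalizing a b c e t with
  | nil => simp [pvB_sources, pvB_datatypes, pvB_fieldNames]
  | cons o os ih =>
    simp only [List.foldl_cons]
    rw [pvA_midLoop_eq _ _ (fun m hm => h o (List.mem_cons_self ..) m hm)]
    rw [ih (fun o' ho' => h o' (List.mem_cons_of_mem _ ho'))]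
    simp [pvB_sources, pvB_datatypes, pvB_fieldNames, List.append_assoc]

-- ===== VERDICT (by name: the statement is the Claim_ definition above) =====
theorem flatten_nested_schema_dict_spec : Claim_equal_flatten_nested_schema_dict := by
  intro d _ hpre
  unfold Spec_flatten_nested_schema_dict flatten_nested_schema_dict flatten_nested_schema_dict_alt
  rw [pvA_outer_eq d hpre]
  simp [PySem.Dict.insert, PySem.Dict.empty, PySem.Dict.contains]
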